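-- pv_equiv track=rewrite | github.com/cafune1853/dayu-agent | tests/fins/test_virtual_section_table_assignment.py | _rebuild_markers_for_text
-- ===== SOURCE A (Python) =====
-- from collections.abc import Sequence
--
-- def _rebuild_markers_for_text(
--     full_text: str,
--     markers: Sequence[tuple[int, str | None]],
-- ) -> list[tuple[int, str | None]]:
--     """按给定全文重算 marker 位置。
--
--     Args:
--         full_text: 当前用于查找标题的位置文本。
--         markers: 原始 marker 列表。
--
--     Returns:
--         重新定位后的 marker 列表。
--
--     Raises:
--         无。
--     """
--
--     result: list[tuple[int, str | None]] = []
--     for _, title in markers: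
--         pos = full_text.find(title) if title else -1
--         if pos >= 0:
--             result.append((pos, title))
--     return result
-- ===== SOURCE B (Python) =====
-- def _rebuild_markers_for_text(full_text, markers):
--     # One forward scan over the text: at each position test which still-pending
--     # distinct titles start there, so each title's first occurrence is found in
--     # a single pass instead of one full find() per marker.
--     pending = list(dict.fromkeys(t for _, t in markers if t))
--     found = {}
--     for i in range(len(full_text) + 1):
--         if not pending:
--             break
--         still = []
--         for t in pending:
--             if full_text.startswith(t, i):
--                 found[t] = i
--             else:
--                 still.append(t)
--         pending = still
--     return [(found[t], t) for _, t in markers if t and t in found]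
-- ===== Notes on version B (the rewrite author's own statement) =====
-- stated objective: alternative
-- what changed: Instead of calling full_text.find(title) once per marker, B makes one forward scan over the text, testing at each position which still-pending distinct titles start there (with early exit once all are found), and then maps every marker through the resulting first-occurrence dictionary; it trades per-marker C-level find() calls for a single shared Python-level pass, so it can be slower in CPython when many distinct titles occur late or never.
import Mathlib
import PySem

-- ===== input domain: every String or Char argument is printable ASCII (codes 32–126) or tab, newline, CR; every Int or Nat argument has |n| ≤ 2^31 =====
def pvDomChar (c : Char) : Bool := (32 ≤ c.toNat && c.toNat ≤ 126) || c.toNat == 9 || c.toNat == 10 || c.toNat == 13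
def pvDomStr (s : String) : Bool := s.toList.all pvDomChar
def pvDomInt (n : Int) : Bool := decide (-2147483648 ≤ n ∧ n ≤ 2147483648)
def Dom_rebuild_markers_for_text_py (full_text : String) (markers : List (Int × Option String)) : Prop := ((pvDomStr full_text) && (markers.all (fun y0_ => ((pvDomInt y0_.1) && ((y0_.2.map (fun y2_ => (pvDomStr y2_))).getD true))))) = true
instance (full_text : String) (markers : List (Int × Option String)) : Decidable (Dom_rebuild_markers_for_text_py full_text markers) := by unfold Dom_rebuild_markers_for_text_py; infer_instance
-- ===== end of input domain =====

-- B replaces one full-text find() per marker by a single forward scan of the text that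
-- locates the first occurrence of every distinct title at once (objective: alternative).

-- ===== PORT A =====
-- for _, title in markers: pos = full_text.find(title) if title else -1; if pos >= 0: append((pos, title))
def rebuild_markers_for_text_py (full_text : String) (markers : List (Int × Option String)) : List (Int × Option String) :=
  markers.foldl (fun result m =>
    let pos : Int := match m.2 with
      | some t => if t ≠ "" then PySem.Str.find full_text t else -1
      | none => -1
    if 0 ≤ pos then result ++ [(pos, m.2)] else result) []

-- ===== PORT B =====
-- one scan position: test every still-pending title at position i
-- (full_text.startswith(t, i) with 0 ≤ i ≤ len(full_text) is exactly: t is a prefix of full_text[i:])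
def pvScanStep (s : List Char) (st : PySem.Dict String Int × List String) (i : Nat) : PySem.Dict String Int × List String :=
  if st.2.isEmpty then st   -- 'if not pending: break'
  else st.2.foldl (fun st' t =>
    if PySem.Chars.startswith (s.drop i) t.toList then (st'.1.insert t (i : Int), st'.2)
    else (st'.1, st'.2 ++ [t])) (st.1, [])

def rebuild_markers_for_text_py_alt (full_text : String) (markers : List (Int × Option String)) : List (Int × Option String) :=
  let s := full_text.toList
  -- pending = list(dict.fromkeys(t for _, t in markers if t))
  let pending := PySem.List.dedup (markers.filterMap (fun m => m.2.bind (fun t => if t = "" then none else some t)))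
  -- for i in range(len(full_text) + 1): …
  let st := (List.range (s.length + 1)).foldl (pvScanStep s) (PySem.Dict.empty, pending)
  -- [(found[t], t) for _, t in markers if t and t in found]
  markers.filterMap (fun m => m.2.bind (fun t =>
    if t ≠ "" then (st.1.get? t).map (fun p => (p, some t)) else none))

-- ===== PRECONDITION & SPEC =====
def Spec_rebuild_markers_for_text_py (full_text : String) (markers : List (Int × Option String)) (out : List (Int × Option String)) : Prop := out = rebuild_markers_for_text_py_alt full_text markers
instance (full_text : String) (markers : List (Int × Option String)) (out : List (Int × Option String)) : Decidable (Spec_rebuild_markers_for_text_py full_text markers out) := by unfold Spec_rebuild_markers_for_text_py; infer_instance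

-- ===== CLAIM (what is proved, stated in full; the proofs are below) =====
def Claim_equal_rebuild_markers_for_text_py : Prop := ∀ (full_text : String) (markers : List (Int × Option String)), Dom_rebuild_markers_for_text_py full_text markers → Spec_rebuild_markers_for_text_py full_text markers (rebuild_markers_for_text_py full_text markers)

-- ===== LEMMAS AND PROOFS =====

theorem pv_find_le_of_prefix (s t : List Char) (j : Nat) (h : t <+: s.drop j) :
    0 ≤ PySem.Chars.find s t ∧ (PySem.Chars.find s t).toNat ≤ j := by
  have hin : PySem.Chars.isIn t s = true := by
    rw [← PySem.Chars.exists_prefix_drop_iff_isIn]; exact ⟨j, h⟩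
  have hne : PySem.Chars.find s t ≠ -1 := by
    rw [PySem.Chars.find_ne_neg_one_iff]
    exact (PySem.Chars.isIn_iff_infix t s).mp hin
  have hnn : 0 ≤ PySem.Chars.find s t := by
    have := PySem.Chars.neg_one_le_find s t; omega
  refine ⟨hnn, ?_⟩
  by_contra hlt
  exact (PySem.Chars.find_spec hnn).2 j (Nat.lt_of_not_le hlt) h

theorem pv_inner_get? (s : List Char) (k : Nat) (l : List String) (d : PySem.Dict String Int)
    (acc : List String) (t0 : String) :
    ((l.foldl (fun st' t =>
        if PySem.Chars.startswith (s.drop k) t.toList then (st'.1.insert t (k : Int), st'.2)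
        else (st'.1, st'.2 ++ [t])) (d, acc)).1).get? t0
      = if t0 ∈ l ∧ PySem.Chars.startswith (s.drop k) t0.toList then some (k : Int) else d.get? t0 := by
  induction l generalizing d acc with
  | nil => simp
  | cons h tl ih =>
    by_cases hsw : PySem.Chars.startswith (s.drop k) h.toList
    · simp only [List.foldl_cons, hsw, if_true]
      rw [ih]
      by_cases ht : t0 = h
      · subst ht
        simp [hsw, PySem.Dict.get?_insert_self]
      · rw [PySem.Dict.get?_insert_of_ne _ _ ht]
        by_cases hm : t0 ∈ tl <;> simp [hm, ht]
    · simp only [List.foldl_cons, hsw]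
      rw [ih]
      by_cases ht : t0 = h
      · subst ht; simp [hsw]
      · simp [ht]

theorem pv_inner_snd (s : List Char) (k : Nat) (l : List String) (d : PySem.Dict String Int)
    (acc : List String) :
    ((l.foldl (fun st' t =>
        if PySem.Chars.startswith (s.drop k) t.toList then (st'.1.insert t (k : Int), st'.2)
        else (st'.1, st'.2 ++ [t])) (d, acc)).2)
      = acc ++ l.filter (fun t => !PySem.Chars.startswith (s.drop k) t.toList) := by
  induction l generalizing d acc with
  | nil => simp
  | cons h tl ih =>
    by_cases hsw : PySem.Chars.startswith (s.drop k) h.toList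
    · simp [hsw, ih]
    · simp [hsw, ih]


theorem pv_sw_iff (s : List Char) (t : String) (k : Nat)
    (hnm : ¬(0 ≤ PySem.Chars.find s t.toList ∧ (PySem.Chars.find s t.toList).toNat < k)) :
    PySem.Chars.startswith (s.drop k) t.toList = true
      ↔ (0 ≤ PySem.Chars.find s t.toList ∧ (PySem.Chars.find s t.toList).toNat = k) := by
  rw [PySem.Chars.startswith_iff]
  constructor
  · intro h
    have h2 := pv_find_le_of_prefix s t.toList k h
    exact ⟨h2.1, by omega⟩
  · rintro ⟨h0, hk⟩
    have := (PySem.Chars.find_spec h0).1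
    rwa [hk] at this

theorem pv_scan_inv (s : List Char) (P : List String) (k : Nat) :
    (∀ t0, ((List.range k).foldl (pvScanStep s) (PySem.Dict.empty, P)).1.get? t0
        = if t0 ∈ P ∧ 0 ≤ PySem.Chars.find s t0.toList ∧ (PySem.Chars.find s t0.toList).toNat < k
          then some (PySem.Chars.find s t0.toList) else none)
    ∧ ((List.range k).foldl (pvScanStep s) (PySem.Dict.empty, P)).2
        = P.filter (fun t => !(decide (0 ≤ PySem.Chars.find s t.toList)
            && decide ((PySem.Chars.find s t.toList).toNat < k))) := by
  induction k with
  | zero =>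
    constructor
    · intro t0; simp [PySem.Dict.get?_empty]
    · simp
  | succ k ih =>
    obtain ⟨ih1, ih2⟩ := ih
    rw [List.range_succ, List.foldl_append, List.foldl_cons, List.foldl_nil]
    set st := (List.range k).foldl (pvScanStep s) (PySem.Dict.empty, P) with hst
    by_cases hemp : st.2.isEmpty
    · have hnil : st.2 = [] := List.isEmpty_iff.mp hemp
      have hall : ∀ t ∈ P, 0 ≤ PySem.Chars.find s t.toList ∧ (PySem.Chars.find s t.toList).toNat < k := by
        intro t ht
        have := List.filter_eq_nil_iff.mp (ih2 ▸ hnil) t ht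
        simp at this
        exact ⟨this.1, this.2⟩
      rw [pvScanStep, if_pos hemp]
      constructor
      · intro t0
        rw [ih1]
        by_cases hm : t0 ∈ P
        · have := hall t0 hm
          simp [hm, this.1, this.2, Nat.lt_succ_of_lt this.2]
        · simp [hm]
      · rw [hnil, eq_comm, List.filter_eq_nil_iff]
        intro t ht
        have := hall t ht
        simp [this.1, Nat.lt_succ_of_lt this.2]
    · rw [pvScanStep, if_neg hemp]
      constructor
      · intro t0
        rw [pv_inner_get? s k st.2 st.1 [] t0, ih1, ih2]
        by_cases h0 : 0 ≤ PySem.Chars.find s t0.toList ∧ (PySem.Chars.find s t0.toList).toNat < k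
        · -- already matched before k
          by_cases hm : t0 ∈ P
          · have hmem : ¬ (t0 ∈ P.filter (fun t => !(decide (0 ≤ PySem.Chars.find s t.toList)
                && decide ((PySem.Chars.find s t.toList).toNat < k)))) := by
              simp [h0.1, h0.2]
            simp only [hmem, false_and, if_false]
            simp [hm, h0.1, h0.2, Nat.lt_succ_of_lt h0.2]
          · simp [hm]
        · -- not matched before k
          have hsw := pv_sw_iff s t0 k h0
          by_cases hm : t0 ∈ P
          · by_cases hswt : PySem.Chars.startswith (s.drop k) t0.toList
            · have hk := hsw.mp hswt
              have hmem : t0 ∈ P.filter (fun t => !(decide (0 ≤ PySem.Chars.find s t.toList)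
                  && decide ((PySem.Chars.find s t.toList).toNat < k))) := by
                simp [hm]; omega
              have hfk : PySem.Chars.find s t0.toList = (k : Int) := by
                omega
              simp [hswt, hm, hfk]
            · have hnk : ¬ (0 ≤ PySem.Chars.find s t0.toList ∧ (PySem.Chars.find s t0.toList).toNat = k) := by
                intro hc; exact hswt (hsw.mpr hc)
              have hcond : ¬ (t0 ∈ P ∧ 0 ≤ PySem.Chars.find s t0.toList ∧ (PySem.Chars.find s t0.toList).toNat < k + 1) := by
                rintro ⟨_, hb, hc⟩
                exact hnk ⟨hb, by omega⟩
              simp only [hswt, if_false, hcond]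
              simp [hm, h0]
          · have : ¬ (t0 ∈ P.filter (fun t => !(decide (0 ≤ PySem.Chars.find s t.toList)
                && decide ((PySem.Chars.find s t.toList).toNat < k)))) := by
              simp [hm]
            simp [hm]
      · rw [pv_inner_snd s k st.2 st.1 [], ih2, List.nil_append, List.filter_filter]
        apply List.filter_congr
        intro t _
        by_cases h0 : 0 ≤ PySem.Chars.find s t.toList ∧ (PySem.Chars.find s t.toList).toNat < k
        · simp [h0.1, h0.2, Nat.lt_succ_of_lt h0.2]
        · have hsw := pv_sw_iff s t k h0
          by_cases hswt : PySem.Chars.startswith (s.drop k) t.toList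
          · have hk := hsw.mp hswt
            simp [hswt, hk.1, hk.2]
          · have hnk : ¬ (0 ≤ PySem.Chars.find s t.toList ∧ (PySem.Chars.find s t.toList).toNat = k) := by
              intro hc; exact hswt (hsw.mpr hc)
            simp only [hswt, Bool.not_false, Bool.not_and]
            by_cases hb : 0 ≤ PySem.Chars.find s t.toList
            · have h1 : ¬ ((PySem.Chars.find s t.toList).toNat < k) := fun hc => h0 ⟨hb, hc⟩
              have h2 : ¬ (PySem.Chars.find s t.toList ≤ (k : Int)) := by
                intro hc; exact hnk ⟨hb, by omega⟩
              simp [hb, h1, h2]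
            · simp [hb]
            

theorem pv_final (full_text : String) (d : PySem.Dict String Int)
    (ms : List (Int × Option String)) (acc : List (Int × Option String))
    (h : ∀ t : String, t ≠ "" → (∃ i, (i, some t) ∈ ms) →
      d.get? t = if 0 ≤ PySem.Chars.find full_text.toList t.toList
        then some (PySem.Chars.find full_text.toList t.toList) else none) :
    ms.foldl (fun result m =>
      let pos : Int := match m.2 with
        | some t => if t ≠ "" then PySem.Str.find full_text t else -1
        | none => -1
      if 0 ≤ pos then result ++ [(pos, m.2)] else result) acc
    = acc ++ ms.filterMap (fun m => m.2.bind (fun t =>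
        if t ≠ "" then (d.get? t).map (fun p => (p, some t)) else none)) := by
  induction ms generalizing acc with
  | nil => simp
  | cons m tl ih =>
    have htl : ∀ t : String, t ≠ "" → (∃ i, (i, some t) ∈ tl) →
        d.get? t = if 0 ≤ PySem.Chars.find full_text.toList t.toList
          then some (PySem.Chars.find full_text.toList t.toList) else none := by
      intro t ht ⟨i, hi⟩
      exact h t ht ⟨i, List.mem_cons_of_mem _ hi⟩
    obtain ⟨mi, mt⟩ := m
    match mt with
    | none =>
      simp only [List.foldl_cons, List.filterMap_cons]
      have : ¬ ((0:Int) ≤ -1) := by norm_num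
      simp only [Option.bind_none]
      rw [ih _ htl]
      simp
    | some t =>
      by_cases ht : t = ""
      · subst ht
        simp only [List.foldl_cons, List.filterMap_cons]
        rw [ih _ htl]
        simp
      · have hd := h t ht ⟨mi, List.mem_cons_self⟩
        simp only [List.foldl_cons, List.filterMap_cons, Option.bind_some, ht,
          ne_eq, not_false_eq_true, if_true, hd]
        by_cases h0 : 0 ≤ PySem.Chars.find full_text.toList t.toList
        · rw [if_pos (by simpa using h0)]
          rw [ih _ htl]
          simp [h0]
        · rw [if_neg (by simpa using h0)]
          rw [ih _ htl]
          simp [h0]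


-- ===== VERDICT (by name: the statement is the Claim_ definition above) =====
theorem rebuild_markers_for_text_py_spec : Claim_equal_rebuild_markers_for_text_py := by
  intro full_text markers _
  unfold Spec_rebuild_markers_for_text_py rebuild_markers_for_text_py rebuild_markers_for_text_py_alt
  simp only []
  set s := full_text.toList with hs
  set P := PySem.List.dedup (markers.filterMap (fun m => m.2.bind (fun t => if t = "" then none else some t))) with hP
  set st := (List.range (s.length + 1)).foldl (pvScanStep s) (PySem.Dict.empty, P) with hst
  have hget := (pv_scan_inv s P (s.length + 1)).1
  rw [pv_final full_text st.1 markers []]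
  · simp
  · intro t ht ⟨i, hi⟩
    have hmemP : t ∈ P := by
      rw [hP, PySem.List.mem_dedup, List.mem_filterMap]
      exact ⟨(i, some t), hi, by simp [ht]⟩
    rw [hget t]
    by_cases h0 : 0 ≤ PySem.Chars.find s t.toList
    · have hle := PySem.Chars.find_le_length s t.toList
      have : (PySem.Chars.find s t.toList).toNat < s.length + 1 := by omega
      simp [hmemP, h0, this, ← hs]
    · simp [h0, ← hs]
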